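-- pv_equiv track=rewrite | github.com/feliciagojali/sentence-imp | generate_srl.py | is_overlapped
-- ===== SOURCE A (Python) =====
-- def is_overlapped(range_1, range_2):
--     s_1, e_1 = range_1
--     s_2, e_2 = range_2
--
--     arr = [x for x in range(max(s_1, s_2), min(e_1, e_2)+1)]
--
--     if (len(arr)!=0):
--         return True
--     else:
--         return False
-- ===== SOURCE B (Python) =====
-- def is_overlapped(range_1, range_2):
--     s_1, e_1 = range_1
--     s_2, e_2 = range_2
--     return max(s_1, s_2) <= min(e_1, e_2)
-- ===== Notes on version B (the rewrite author's own statement) =====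
-- stated objective: simpler
-- what changed: Replaces building the list of all integers in the overlap region and testing its length with the direct closed-form comparison max(start) <= min(end).
import Mathlib
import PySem

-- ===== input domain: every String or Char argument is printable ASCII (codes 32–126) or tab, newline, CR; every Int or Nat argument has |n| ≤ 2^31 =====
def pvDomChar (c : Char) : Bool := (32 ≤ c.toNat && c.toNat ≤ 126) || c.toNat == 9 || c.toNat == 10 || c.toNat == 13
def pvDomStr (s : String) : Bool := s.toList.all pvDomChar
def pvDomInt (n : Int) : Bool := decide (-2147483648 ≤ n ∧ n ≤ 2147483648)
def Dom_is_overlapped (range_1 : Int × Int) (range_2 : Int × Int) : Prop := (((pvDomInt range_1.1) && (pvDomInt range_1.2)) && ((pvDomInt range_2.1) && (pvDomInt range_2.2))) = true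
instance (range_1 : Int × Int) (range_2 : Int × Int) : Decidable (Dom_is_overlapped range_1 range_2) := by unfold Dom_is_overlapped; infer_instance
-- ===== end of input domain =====

-- B replaces A's enumeration of the overlap region with the closed-form test max(start) <= min(end) (simpler).

-- ===== PORT A =====
def is_overlapped (range_1 : Int × Int) (range_2 : Int × Int) : Bool :=
  let s_1 := range_1.1; let e_1 := range_1.2
  let s_2 := range_2.1; let e_2 := range_2.2
  let arr := (PySem.List.pyRange (max s_1 s_2) (min e_1 e_2 + 1) 1).map (fun x => x)
  if arr.length ≠ 0 then true else false

-- ===== PORT B =====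
-- B: closed-form overlap test
def is_overlapped_alt (range_1 : Int × Int) (range_2 : Int × Int) : Bool :=
  max range_1.1 range_2.1 ≤ min range_1.2 range_2.2

-- ===== PRECONDITION & SPEC =====
def Spec_is_overlapped (range_1 : Int × Int) (range_2 : Int × Int) (out : Bool) : Prop := out = is_overlapped_alt range_1 range_2
instance (range_1 : Int × Int) (range_2 : Int × Int) (out : Bool) : Decidable (Spec_is_overlapped range_1 range_2 out) := by unfold Spec_is_overlapped; infer_instance

-- ===== CLAIM (what is proved, stated in full; the proofs are below) =====
def Claim_equal_is_overlapped : Prop := ∀ (range_1 : Int × Int) (range_2 : Int × Int), Dom_is_overlapped range_1 range_2 → Spec_is_overlapped range_1 range_2 (is_overlapped range_1 range_2)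

-- ===== LEMMAS AND PROOFS =====

-- ===== VERDICT (by name: the statement is the Claim_ definition above) =====
theorem is_overlapped_spec : Claim_equal_is_overlapped := by
  intro r1 r2 _
  unfold Spec_is_overlapped is_overlapped is_overlapped_alt
  simp only [List.length_map, PySem.List.length_pyRange_one, ne_eq]
  split_ifs with h
  · simp; omega
  · simp; omega
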